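-- pv_equiv track=rewrite | github.com/omaratta2001/SecurityProject | AES.py | plaintext_to_binary
-- ===== SOURCE A (Python) =====
-- def plaintext_to_binary(plaintext):
--     binary_blocks = ""
--     for i in range(0, len(plaintext), 2):
--         if i + 1 < len(plaintext):
--             binary_block = format(ord(plaintext[i]), '08b') + format(ord(plaintext[i + 1]), '08b')
--         else:
--             binary_block = format(ord(plaintext[i]), '08b') + '00000000'
--         binary_blocks += binary_block
--
--     while len(binary_blocks) % 16 != 0:
--         binary_blocks += '0'
--
--     return binary_blocks[:16]
-- ===== SOURCE B (Python) =====
-- def plaintext_to_binary(plaintext):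
--     # Only the first 16 bits (two characters) are ever returned: compute them directly.
--     if not plaintext:
--         return ""
--     first = format(ord(plaintext[0]), '08b')
--     if len(plaintext) == 1:
--         return first + '00000000'
--     return first + format(ord(plaintext[1]), '08b')
-- ===== Notes on version B (the rewrite author's own statement) =====
-- stated objective: simpler
-- what changed: B drops the encode-everything loop and the padding loop: since only the first 16 bits are returned, it encodes at most the first two characters closed-form (empty string stays empty, a single character is padded with eight zero bits).
import Mathlib
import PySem

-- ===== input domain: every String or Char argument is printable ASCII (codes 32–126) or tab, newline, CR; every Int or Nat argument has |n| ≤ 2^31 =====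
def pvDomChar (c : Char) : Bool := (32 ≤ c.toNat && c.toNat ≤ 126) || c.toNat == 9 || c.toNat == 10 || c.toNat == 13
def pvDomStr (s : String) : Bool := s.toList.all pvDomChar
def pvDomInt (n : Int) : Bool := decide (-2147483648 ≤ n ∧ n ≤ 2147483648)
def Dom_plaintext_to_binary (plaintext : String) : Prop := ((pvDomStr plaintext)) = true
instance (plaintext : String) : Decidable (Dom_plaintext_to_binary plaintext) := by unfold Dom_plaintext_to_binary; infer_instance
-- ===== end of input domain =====

-- B returns the same first 16 bits without building the full encoding: it encodes at most the
-- first two characters closed-form (asymptotically faster; A is O(n), B is O(1)).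


-- ===== PORT A =====
-- format(n, '08b'): 8 binary digits, MSB first; exact for n < 256 (Dom chars have code ≤ 126)
def fmt8 (n : Nat) : List Char :=
  (List.range 8).map (fun k => if n >>> (7 - k) &&& 1 = 1 then '1' else '0')

-- the for-loop over range(0, len, 2): consumes two chars per iteration, appending one 16-bit block
def ptbLoop : List Char → List Char
  | [] => []
  | [c] => fmt8 c.toNat ++ ['0','0','0','0','0','0','0','0']
  | c1 :: c2 :: rest => (fmt8 c1.toNat ++ fmt8 c2.toNat) ++ ptbLoop rest

-- the while-loop: append '0' until the length is a multiple of 16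
def padTo16 (l : List Char) : List Char :=
  if l.length % 16 = 0 then l else padTo16 (l ++ ['0'])
termination_by (16 - l.length % 16) % 16
decreasing_by simp_all; omega

def plaintext_to_binary (plaintext : String) : String :=
  -- binary_blocks[:16] with nonnegative bounds is List.take 16 (exact here)
  String.ofList ((padTo16 (ptbLoop plaintext.toList)).take 16)

-- ===== PORT B =====
def plaintext_to_binary_alt (plaintext : String) : String :=
  match plaintext.toList with
  | [] => ""
  | [c] => String.ofList (fmt8 c.toNat ++ ['0','0','0','0','0','0','0','0'])
  | c1 :: c2 :: _ => String.ofList (fmt8 c1.toNat ++ fmt8 c2.toNat)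

-- ===== PRECONDITION & SPEC =====
def Spec_plaintext_to_binary (plaintext : String) (out : String) : Prop := out = plaintext_to_binary_alt plaintext
instance (plaintext : String) (out : String) : Decidable (Spec_plaintext_to_binary plaintext out) := by unfold Spec_plaintext_to_binary; infer_instance

-- ===== CLAIM (what is proved, stated in full; the proofs are below) =====
def Claim_equal_plaintext_to_binary : Prop := ∀ (plaintext : String), Dom_plaintext_to_binary plaintext → Spec_plaintext_to_binary plaintext (plaintext_to_binary plaintext)

-- ===== LEMMAS AND PROOFS =====
theorem fmt8_length (n : Nat) : (fmt8 n).length = 8 := by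
  simp [fmt8]

theorem ptbLoop_length_mod (l : List Char) : (ptbLoop l).length % 16 = 0 := by
  induction l using ptbLoop.induct with
  | case1 => simp [ptbLoop]
  | case2 c => simp [ptbLoop, fmt8_length]
  | case3 c1 c2 rest ih =>
      simp [ptbLoop, fmt8_length] at *
      omega

theorem padTo16_eq_of_mod (l : List Char) (h : l.length % 16 = 0) : padTo16 l = l := by
  unfold padTo16
  simp [h]

theorem plaintext_to_binary_spec : Claim_equal_plaintext_to_binary := by
  intro plaintext _
  unfold Spec_plaintext_to_binary plaintext_to_binary plaintext_to_binary_alt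
  rw [padTo16_eq_of_mod _ (ptbLoop_length_mod _)]
  rcases h : plaintext.toList with _ | ⟨c1, _ | ⟨c2, rest⟩⟩
  · simp [ptbLoop]
  · have hlen : (fmt8 c1.toNat ++ ['0','0','0','0','0','0','0','0']).length = 16 := by
      simp [fmt8_length]
    simp [ptbLoop, List.take_of_length_le (le_of_eq hlen)]
  · have hlen : (fmt8 c1.toNat ++ fmt8 c2.toNat).length = 16 := by
      simp [fmt8_length]
    simp [ptbLoop, List.take_append, fmt8_length, List.take_of_length_le]
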